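-- pv_equiv track=rewrite | github.com/VSurzhan/chat_statistic | statistics_collection.py | dataSort
-- ===== SOURCE A (Python) =====
-- def dataSort(datas):
--     may = []
--     june = []
--     for k in datas:
--         if '.05.' in k:
--             may.append(k)
--         else:
--             june.append(k)
--     return sorted(may) + sorted(june)
-- ===== SOURCE B (Python) =====
-- def dataSort(datas):
--     s = sorted(datas)
--     return [k for k in s if '.05.' in k] + [k for k in s if '.05.' not in k]
-- ===== Notes on version B (the rewrite author's own statement) =====
-- stated objective: simpler
-- what changed: B sorts the whole list once up front and then partitions the sorted list by the '.05.' substring test, instead of partitioning first and running two separate sorts.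
import Mathlib
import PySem

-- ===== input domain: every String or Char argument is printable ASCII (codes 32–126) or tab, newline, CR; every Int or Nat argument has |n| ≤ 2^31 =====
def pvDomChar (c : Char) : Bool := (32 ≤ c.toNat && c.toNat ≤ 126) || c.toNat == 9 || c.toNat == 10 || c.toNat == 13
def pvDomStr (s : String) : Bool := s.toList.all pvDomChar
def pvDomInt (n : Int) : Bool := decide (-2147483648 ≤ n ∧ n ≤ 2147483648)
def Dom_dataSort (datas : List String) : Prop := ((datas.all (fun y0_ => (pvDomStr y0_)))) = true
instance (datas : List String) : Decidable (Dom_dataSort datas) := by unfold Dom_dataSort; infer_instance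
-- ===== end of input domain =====

-- B sorts the whole list once up front and then partitions the sorted list by the
-- '.05.' substring test (simpler decomposition); A partitions first and sorts each part.

-- ===== PORT A =====
def dataSort (datas : List String) : List String :=
  let mj := datas.foldl
    (fun (acc : List String × List String) k =>
      if PySem.Str.isIn ".05." k then (acc.1 ++ [k], acc.2) else (acc.1, acc.2 ++ [k]))
    ([], [])
  PySem.List.sorted mj.1 (fun x => x) false ++ PySem.List.sorted mj.2 (fun x => x) false

-- ===== PORT B =====
def dataSort_alt (datas : List String) : List String :=
  let s := PySem.List.sorted datas (fun x => x) false
  (s.filter (fun k => PySem.Str.isIn ".05." k)) ++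
    (s.filter (fun k => !PySem.Str.isIn ".05." k))

-- ===== PRECONDITION & SPEC =====
def Spec_dataSort (datas : List String) (out : List String) : Prop := out = dataSort_alt datas
instance (datas : List String) (out : List String) : Decidable (Spec_dataSort datas out) := by unfold Spec_dataSort; infer_instance

-- ===== CLAIM (what is proved, stated in full; the proofs are below) =====
def Claim_equal_dataSort : Prop := ∀ (datas : List String), Dom_dataSort datas → Spec_dataSort datas (dataSort datas)

-- ===== LEMMAS AND PROOFS =====

-- A's one-pass partition loop computes (filter p, filter ¬p)
theorem pv_fold_partition (p : String → Bool) (l : List String)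
    (acc : List String × List String) :
    l.foldl (fun (acc : List String × List String) k =>
        if p k then (acc.1 ++ [k], acc.2) else (acc.1, acc.2 ++ [k])) acc
      = (acc.1 ++ l.filter p, acc.2 ++ l.filter (fun k => !p k)) := by
  induction l generalizing acc with
  | nil => simp
  | cons x t ih =>
    by_cases h : p x = true <;>
      simp [List.foldl_cons, h, ih]

-- sorting then filtering equals filtering then sorting (stable sort, total order)
theorem pv_filter_sorted (p : String → Bool) (l : List String) :
    PySem.List.sorted (l.filter p) (fun x => x) false
      = (PySem.List.sorted l (fun x => x) false).filter p := by
  apply PySem.List.sorted_id_eq_of_perm_of_pairwise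
  · exact ((PySem.List.sorted_perm l (fun x => x) false).filter p)
  · exact (PySem.List.sorted_pairwise l (fun x => x)).filter p

-- ===== VERDICT (by name: the statement is the Claim_ definition above) =====
theorem dataSort_spec : Claim_equal_dataSort := by
  intro datas _
  unfold Spec_dataSort dataSort dataSort_alt
  rw [pv_fold_partition]
  simp only [List.nil_append]
  rw [pv_filter_sorted, pv_filter_sorted]
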